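-- pv_equiv track=rewrite | github.com/aragorn-w/sae-recursive-depth | src/analysis/figures.py | _latest_per_id
-- ===== SOURCE A (Python) =====
-- def _latest_per_id(rows: list[dict[str, str]]) -> dict[str, dict[str, str]]:
--     latest: dict[str, dict[str, str]] = {}
--     for r in rows:
--         eid = r.get("experiment_id", "")
--         if not eid:
--             continue
--         ts = r.get("timestamp", "")
--         if eid not in latest or ts > latest[eid].get("timestamp", ""):
--             latest[eid] = r
--     return latest
-- ===== SOURCE B (Python) =====
-- def _latest_per_id(rows: list[dict[str, str]]) -> dict[str, dict[str, str]]: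
--     # Group rows by experiment_id, then reduce each group with max.
--     # max returns the FIRST maximal element, matching the strict '>' first-wins
--     # tie-break of the running-max version.
--     groups: dict[str, list[dict[str, str]]] = {}
--     for r in rows:
--         eid = r.get("experiment_id", "")
--         if not eid:
--             continue
--         groups.setdefault(eid, []).append(r)
--     return {eid: max(grp, key=lambda r: r.get("timestamp", ""))
--             for eid, grp in groups.items()}
-- ===== Notes on version B (the rewrite author's own statement) =====
-- stated objective: alternative
-- what changed: Replaces A's single-pass online running-max dict with a two-pass group-then-reduce: first group rows by experiment_id via setdefault, then pick each group's maximum-timestamp row with max(key=...), relying on max's first-maximal rule to match A's strict '>' tie-break.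
import Mathlib
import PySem

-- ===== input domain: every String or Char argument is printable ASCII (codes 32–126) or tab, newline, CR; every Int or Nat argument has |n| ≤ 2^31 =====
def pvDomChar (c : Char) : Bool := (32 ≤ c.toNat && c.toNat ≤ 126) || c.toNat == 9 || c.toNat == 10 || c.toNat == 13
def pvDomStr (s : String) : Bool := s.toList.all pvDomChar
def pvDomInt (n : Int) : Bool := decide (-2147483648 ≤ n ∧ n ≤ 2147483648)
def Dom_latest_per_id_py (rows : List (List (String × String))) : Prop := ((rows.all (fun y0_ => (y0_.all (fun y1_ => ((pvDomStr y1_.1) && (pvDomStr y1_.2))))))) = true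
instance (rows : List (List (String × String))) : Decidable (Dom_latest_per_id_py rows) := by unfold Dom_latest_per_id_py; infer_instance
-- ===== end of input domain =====

-- B replaces A's online running-max per id by a group-then-reduce decomposition
-- (group rows by id, then pick each group's max by timestamp); objective: alternative.

-- shared row lookup: r.get(key, dflt) on a row (a Python dict given as its item list)
def pvRowGet (r : List (String × String)) (k dflt : String) : String :=
  (PySem.Dict.mk r).getD k dflt

-- ===== PORT A =====
-- loop body of A: running 'latest' dict, keep r when id is new or its timestamp is strictly greater
def pvAStep (latest : PySem.Dict String (List (String × String))) (r : List (String × String)) :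
    PySem.Dict String (List (String × String)) :=
  let eid := pvRowGet r "experiment_id" ""
  if eid = "" then latest
  else
    let ts := pvRowGet r "timestamp" ""
    match latest.get? eid with
    | none => latest.insert eid r
    | some cur => if pvRowGet cur "timestamp" "" < ts then latest.insert eid r else latest

def latest_per_id_py (rows : List (List (String × String))) : List (String × List (String × String)) :=
  (rows.foldl pvAStep PySem.Dict.empty).items

-- ===== PORT B =====
-- first pass: groups.setdefault(eid, []).append(r)
def pvBGroup (g : PySem.Dict String (List (List (String × String)))) (r : List (String × String)) :
    PySem.Dict String (List (List (String × String))) :=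
  let eid := pvRowGet r "experiment_id" ""
  if eid = "" then g else g.modify eid [] (· ++ [r])

-- max(grp, key=lambda r: r.get("timestamp", "")); groups only hold nonempty lists,
-- so max? is always some and the [] default is unreachable
def pvGroupMax (grp : List (List (String × String))) : List (String × String) :=
  (PySem.List.max? grp (fun r => pvRowGet r "timestamp" "")).getD []

def latest_per_id_py_alt (rows : List (List (String × String))) : List (String × List (String × String)) :=
  let groups := rows.foldl pvBGroup PySem.Dict.empty
  -- second pass: the dict comprehension {eid: max(grp, ...) for eid, grp in groups.items()}
  (groups.items.foldl
    (fun out p => out.insert p.1 (pvGroupMax p.2)) PySem.Dict.empty).items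

-- ===== PRECONDITION & SPEC =====
def Spec_latest_per_id_py (rows : List (List (String × String))) (out : List (String × List (String × String))) : Prop := out = latest_per_id_py_alt rows
instance (rows : List (List (String × String))) (out : List (String × List (String × String))) : Decidable (Spec_latest_per_id_py rows out) := by unfold Spec_latest_per_id_py; infer_instance

-- ===== CLAIM (what is proved, stated in full; the proofs are below) =====
def Claim_equal_latest_per_id_py : Prop := ∀ (rows : List (List (String × String))), Dom_latest_per_id_py rows → Spec_latest_per_id_py rows (latest_per_id_py rows)

-- ===== LEMMAS AND PROOFS =====

-- map pvGroupMax over a dict's values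
def pvMapVal (g : PySem.Dict String (List (List (String × String)))) :
    PySem.Dict String (List (String × String)) :=
  PySem.Dict.mk (g.items.map (fun p => (p.1, pvGroupMax p.2)))

theorem pv_get?_mapVal (g : PySem.Dict String (List (List (String × String)))) (k : String) :
    (pvMapVal g).get? k = (g.get? k).map pvGroupMax := by
  obtain ⟨items⟩ := g
  induction items with
  | nil => rfl
  | cons p rest ih =>
    simp only [pvMapVal, PySem.Dict.get?, PySem.Dict.items, List.map_cons, List.find?_cons] at *
    by_cases h : p.1 == k
    · simp [h]
    · simp only [h, Bool.false_eq_true] at *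
      simpa using ih

theorem pv_contains_mapVal (g : PySem.Dict String (List (List (String × String)))) (k : String) :
    (pvMapVal g).contains k = g.contains k := by
  simp [pvMapVal, PySem.Dict.contains, List.any_map, Function.comp_def]

theorem pv_keys_mapVal (g : PySem.Dict String (List (List (String × String)))) :
    (pvMapVal g).keys = g.keys := by
  simp [pvMapVal, PySem.Dict.keys, List.map_map, Function.comp]

theorem pv_mapVal_insert (g : PySem.Dict String (List (List (String × String))))
    (k : String) (v : List (List (String × String))) :
    pvMapVal (g.insert k v) = (pvMapVal g).insert k (pvGroupMax v) := by
  unfold PySem.Dict.insert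
  rw [pv_contains_mapVal]
  by_cases h : g.contains k
  · simp only [h, if_true, pvMapVal, PySem.Dict.items, List.map_map]
    congr 1
    apply List.map_congr_left
    intro p _
    by_cases hp : p.1 = k <;> simp [hp]
  · simp [h, pvMapVal]

theorem pv_groupMax_singleton (r : List (String × String)) : pvGroupMax [r] = r := rfl

theorem pv_groupMax_append (l : List (List (String × String))) (r : List (String × String)) (h : l ≠ []) :
    pvGroupMax (l ++ [r]) =
      if pvRowGet (pvGroupMax l) "timestamp" "" < pvRowGet r "timestamp" "" then r else pvGroupMax l := by
  obtain ⟨m, hm⟩ : ∃ m, PySem.List.max? l (fun r => pvRowGet r "timestamp" "") = some m := by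
    rcases ho : PySem.List.max? l (fun r => pvRowGet r "timestamp" "") with _ | m
    · exact absurd ((PySem.List.max?_eq_none_iff _ _).mp ho) h
    · exact ⟨m, rfl⟩
  unfold pvGroupMax PySem.List.max? at *
  rw [List.foldl_append, hm]
  simp only [List.foldl_cons, List.foldl_nil, Option.getD_some]
  split_ifs <;> rfl

theorem pv_map_replace_self (k : String) (v : List (String × String))
    (items : List (String × List (String × String)))
    (hnd : (items.map (fun x => x.1)).Nodup)
    (h : Option.map (fun x => x.2) (items.find? (fun p => p.1 == k)) = some v) :
    items.map (fun p => if (p.1 == k) = true then (k, v) else p) = items := by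
  induction items with
  | nil => simp at h
  | cons p rest ih =>
    simp only [List.map_cons, List.nodup_cons] at hnd
    simp only [List.find?_cons] at h
    by_cases hp : (p.1 == k) = true
    · simp only [hp] at h
      have hk : p.1 = k := by simpa using hp
      have hpv : (k, v) = p := by
        obtain ⟨p1, p2⟩ := p; simp at h hk; simp [hk, h]
      have hrest : ∀ q ∈ rest, (if (q.1 == k) = true then (k, v) else q) = q := by
        intro q hq
        have : ¬ (q.1 == k) := by
          intro hqk
          exact hnd.1 (hk ▸ (by simpa using hqk) ▸ List.mem_map_of_mem hq)
        simp [this]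
      simp only [List.map_cons, if_pos hp]
      rw [List.map_congr_left hrest]
      simp [hpv]
    · simp only [hp, Bool.false_eq_true, if_false] at h
      simp only [List.map_cons, if_neg hp]
      rw [ih hnd.2 h]

theorem pv_insert_get?_self (d : PySem.Dict String (List (String × String)))
    (k : String) (v : List (String × String)) (hnd : d.keys.Nodup) (h : d.get? k = some v) :
    d.insert k v = d := by
  have hc : d.contains k = true := by
    rw [PySem.Dict.contains_eq_isSome_get?, h]; rfl
  unfold PySem.Dict.insert
  rw [hc, if_pos rfl]
  obtain ⟨items⟩ := d
  congr 1
  exact pv_map_replace_self k v items hnd h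

theorem pv_step (g : PySem.Dict String (List (List (String × String))))
    (r : List (String × String))
    (hnd : g.keys.Nodup) (hne : ∀ k l, g.get? k = some l → l ≠ []) :
    pvAStep (pvMapVal g) r = pvMapVal (pvBGroup g r) := by
  unfold pvAStep pvBGroup
  by_cases he : pvRowGet r "experiment_id" "" = ""
  · simp [he]
  · simp only [he, if_false]
    rw [pv_get?_mapVal]
    rcases hg : g.get? (pvRowGet r "experiment_id" "") with _ | l
    · simp only [Option.map_none]
      rw [PySem.Dict.modify, PySem.Dict.getD_eq_get?_getD, hg, Option.getD_none,
        List.nil_append, pv_mapVal_insert, pv_groupMax_singleton]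
    · simp only [Option.map_some]
      rw [PySem.Dict.modify, PySem.Dict.getD_eq_get?_getD, hg, Option.getD_some,
        pv_mapVal_insert, pv_groupMax_append l r (hne _ _ hg)]
      by_cases hlt : pvRowGet (pvGroupMax l) "timestamp" "" < pvRowGet r "timestamp" ""
      · simp [hlt]
      · simp only [hlt, if_false]
        rw [pv_insert_get?_self]
        · rw [pv_keys_mapVal]; exact hnd
        · rw [pv_get?_mapVal, hg]; rfl

theorem pv_step_nodup (g : PySem.Dict String (List (List (String × String))))
    (r : List (String × String)) (hnd : g.keys.Nodup) : (pvBGroup g r).keys.Nodup := by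
  unfold pvBGroup PySem.Dict.modify
  by_cases he : pvRowGet r "experiment_id" "" = ""
  · simpa [he] using hnd
  · simp only [he, if_false]
    exact PySem.Dict.nodup_keys_insert _ _ _ hnd

theorem pv_step_ne (g : PySem.Dict String (List (List (String × String))))
    (r : List (String × String)) (hne : ∀ k l, g.get? k = some l → l ≠ []) :
    ∀ k l, (pvBGroup g r).get? k = some l → l ≠ [] := by
  unfold pvBGroup PySem.Dict.modify
  by_cases he : pvRowGet r "experiment_id" "" = ""
  · simpa [he] using hne
  · simp only [he, if_false]
    intro k l hk
    rw [PySem.Dict.get?_insert] at hk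
    split_ifs at hk
    · cases hk; simp
    · exact hne _ _ hk

theorem pv_main (rows : List (List (String × String)))
    (g : PySem.Dict String (List (List (String × String))))
    (hnd : g.keys.Nodup) (hne : ∀ k l, g.get? k = some l → l ≠ []) :
    rows.foldl pvAStep (pvMapVal g) = pvMapVal (rows.foldl pvBGroup g) := by
  induction rows generalizing g with
  | nil => rfl
  | cons r rows ih =>
    simp only [List.foldl_cons]
    rw [pv_step g r hnd hne]
    exact ih _ (pv_step_nodup g r hnd) (pv_step_ne g r hne)

theorem pv_final (g : PySem.Dict String (List (List (String × String)))) (hnd : g.keys.Nodup) :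
    (g.items.foldl (fun out p => out.insert p.1 (pvGroupMax p.2))
        (PySem.Dict.empty : PySem.Dict String (List (String × String)))).items
      = (pvMapVal g).items := by
  have h := PySem.Dict.items_foldl_insert_fresh g.items (fun p => p.1) (fun p => pvGroupMax p.2)
    (PySem.Dict.empty : PySem.Dict String (List (String × String)))
    (fun a _ => rfl) hnd
  simpa using h

theorem pv_foldl_nodup (rows : List (List (String × String)))
    (g : PySem.Dict String (List (List (String × String)))) (hnd : g.keys.Nodup) :
    (rows.foldl pvBGroup g).keys.Nodup := by
  induction rows generalizing g with
  | nil => exact hnd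
  | cons r rows ih => exact ih _ (pv_step_nodup g r hnd)

-- ===== VERDICT (by name: the statement is the Claim_ definition above) =====
theorem latest_per_id_py_spec : Claim_equal_latest_per_id_py := by
  intro rows _
  unfold Spec_latest_per_id_py latest_per_id_py latest_per_id_py_alt
  have h0 : (PySem.Dict.empty : PySem.Dict String (List (List (String × String)))).keys.Nodup := by
    simp [PySem.Dict.keys, PySem.Dict.empty]
  have hnd : (rows.foldl pvBGroup PySem.Dict.empty).keys.Nodup := pv_foldl_nodup rows _ h0
  rw [pv_final _ hnd]
  have hmain := pv_main rows PySem.Dict.empty h0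
    (by intro k l h; simp [PySem.Dict.get?, PySem.Dict.empty] at h)
  have hempty : (PySem.Dict.empty : PySem.Dict String (List (String × String))) =
      pvMapVal PySem.Dict.empty := rfl
  rw [hempty, hmain]
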